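-- pv_equiv track=rewrite | github.com/EmFib/Chordify | src/logistic_many_chords.py | make_phrase_is_minor_list
-- ===== SOURCE A (Python) =====
-- def make_phrase_is_minor_list(chord_phrase_tuples):
--     '''
--     Creates lists of phrases, actual chords, whether chord is minor, and song id for song containing phrase. (All lists equal length.)
--     '''
--     phrases = []
--     chords = []
--     is_minor = []
--     song_ids = []
--
--     for chord_phrase_tup in chord_phrase_tuples:
--         phrases.append(chord_phrase_tup[1])
--         chords.append(chord_phrase_tup[0])
--         is_minor.append('m' in chord_phrase_tup[0])
--         song_ids.append(chord_phrase_tup[2])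
--
--     return phrases, chords, is_minor, song_ids
-- ===== SOURCE B (Python) =====
-- def make_phrase_is_minor_list(chord_phrase_tuples):
--     '''
--     Creates lists of phrases, actual chords, whether chord is minor, and song id for song containing phrase. (All lists equal length.)
--     '''
--     cols = list(zip(*chord_phrase_tuples))
--     if not cols:
--         return [], [], [], []
--     chords = list(cols[0])
--     phrases = list(cols[1])
--     song_ids = list(cols[2])
--     is_minor = ['m' in c for c in chords]
--     return phrases, chords, is_minor, song_ids
-- ===== Notes on version B (the rewrite author's own statement) =====
-- stated objective: idiomatic
-- what changed: Replaces the row-wise loop with four appends by a columnar zip(*) transpose plus a separate comprehension deriving is_minor from the extracted chords column.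
import Mathlib
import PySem

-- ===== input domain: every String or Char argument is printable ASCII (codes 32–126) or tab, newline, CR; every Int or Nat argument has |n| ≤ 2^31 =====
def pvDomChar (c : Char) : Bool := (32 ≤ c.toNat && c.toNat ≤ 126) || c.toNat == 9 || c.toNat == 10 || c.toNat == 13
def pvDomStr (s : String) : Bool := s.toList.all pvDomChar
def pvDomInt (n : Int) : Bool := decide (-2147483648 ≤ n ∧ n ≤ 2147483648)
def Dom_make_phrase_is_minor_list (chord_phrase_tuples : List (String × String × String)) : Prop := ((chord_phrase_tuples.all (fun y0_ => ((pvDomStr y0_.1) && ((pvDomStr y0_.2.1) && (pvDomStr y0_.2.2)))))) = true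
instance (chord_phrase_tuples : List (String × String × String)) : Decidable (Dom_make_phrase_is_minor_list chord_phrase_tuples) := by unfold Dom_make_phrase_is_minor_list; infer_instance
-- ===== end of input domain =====

-- ===== PORT A =====
-- B transposes the input columnarly (zip) and derives is_minor in a second pass; A loops row-wise. (idiomatic alternative, same cost)
def make_phrase_is_minor_list (chord_phrase_tuples : List (String × String × String)) : List String × List String × List Bool × List String :=
  let acc := chord_phrase_tuples.foldl
    (fun (st : List String × List String × List Bool × List String) t =>
      (st.1 ++ [t.2.1], st.2.1 ++ [t.1], st.2.2.1 ++ [PySem.Str.isIn "m" t.1], st.2.2.2 ++ [t.2.2]))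
    ([], [], [], [])
  acc

-- ===== PORT B =====
-- columnar: each column extracted by one map (the zip(*) transpose), is_minor derived from the chords column
def make_phrase_is_minor_list_alt (chord_phrase_tuples : List (String × String × String)) : List String × List String × List Bool × List String :=
  match chord_phrase_tuples with
  | [] => ([], [], [], [])
  | _ =>
    let chords := chord_phrase_tuples.map (fun t => t.1)
    let phrases := chord_phrase_tuples.map (fun t => t.2.1)
    let song_ids := chord_phrase_tuples.map (fun t => t.2.2)
    let is_minor := chords.map (fun c => PySem.Str.isIn "m" c)
    (phrases, chords, is_minor, song_ids)

-- ===== PRECONDITION & SPEC =====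
def Spec_make_phrase_is_minor_list (chord_phrase_tuples : List (String × String × String)) (out : List String × List String × List Bool × List String) : Prop := out = make_phrase_is_minor_list_alt chord_phrase_tuples
instance (chord_phrase_tuples : List (String × String × String)) (out : List String × List String × List Bool × List String) : Decidable (Spec_make_phrase_is_minor_list chord_phrase_tuples out) := by unfold Spec_make_phrase_is_minor_list; infer_instance

-- ===== CLAIM =====
def Claim_equal_make_phrase_is_minor_list : Prop := ∀ (chord_phrase_tuples : List (String × String × String)), Dom_make_phrase_is_minor_list chord_phrase_tuples → Spec_make_phrase_is_minor_list chord_phrase_tuples (make_phrase_is_minor_list chord_phrase_tuples)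

-- ===== LEMMAS AND PROOFS =====
theorem mpiml_foldl (l : List (String × String × String))
    (p c : List String) (m : List Bool) (s : List String) :
    l.foldl
      (fun (st : List String × List String × List Bool × List String) t =>
        (st.1 ++ [t.2.1], st.2.1 ++ [t.1], st.2.2.1 ++ [PySem.Str.isIn "m" t.1], st.2.2.2 ++ [t.2.2]))
      (p, c, m, s)
    = (p ++ l.map (fun t => t.2.1), c ++ l.map (fun t => t.1),
       m ++ l.map (fun t => PySem.Str.isIn "m" t.1), s ++ l.map (fun t => t.2.2)) := by
  induction l generalizing p c m s with
  | nil => simp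
  | cons h t ih => rw [List.foldl_cons, ih]; simp

-- ===== VERDICT =====
theorem make_phrase_is_minor_list_spec : Claim_equal_make_phrase_is_minor_list := by
  intro l _
  unfold Spec_make_phrase_is_minor_list make_phrase_is_minor_list make_phrase_is_minor_list_alt
  cases l with
  | nil => rfl
  | cons h t =>
    rw [show ((h :: t).foldl
      (fun (st : List String × List String × List Bool × List String) t =>
        (st.1 ++ [t.2.1], st.2.1 ++ [t.1], st.2.2.1 ++ [PySem.Str.isIn "m" t.1], st.2.2.2 ++ [t.2.2]))
      ([], [], [], [])) = _ from mpiml_foldl (h :: t) [] [] [] []]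
    simp [List.map_map, Function.comp]
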